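-- pv_equiv track=rewrite | github.com/chasefinch/cutesy | cutesy/attribute_processors/tailwind.py | parse_tailwind_class
-- ===== SOURCE A (Python) =====
-- from typing import TYPE_CHECKING, Final, NamedTuple, TypeAlias
--
-- class TailwindClass(NamedTuple):
--     """Class representation for Tailwind CSS."""
--
--     class_name: str
--     modifiers: list[str]
--     full_string: str
--
-- def parse_tailwind_class(full: str) -> TailwindClass:
--     """Parse a Tailwind class string into a TailwindClass object."""
--     parts = []
--     buffer = []
--     in_brackets = False
--     escape = False
--
--     for char in full:
--         if escape:
--             buffer.append(char)
--             escape = False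
--             continue
--
--         if char == "\\":
--             buffer.append(char)  # keep backslash for fidelity
--             escape = True
--             continue
--
--         if char == ":" and not in_brackets:
--             parts.append("".join(buffer))
--             buffer = []
--         else:
--             if char == "[":
--                 in_brackets = True
--             elif char == "]":
--                 in_brackets = False
--             buffer.append(char)
--
--     parts.append("".join(buffer))
--
--     modifiers, base = parts[:-1], parts[-1]
--
--     return TailwindClass(
--         class_name=base,
--         modifiers=modifiers,
--         full_string=full,
--     )
-- ===== SOURCE B (Python) =====
-- def parse_tailwind_class(full):
--     """Parse a Tailwind class string into a TailwindClass-shaped tuple.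
--
--     One pass records the indices of unescaped, bracket-depth-0 colons;
--     the parts are then slices of the original string between those indices.
--     """
--     splits = []
--     in_brackets = False
--     escape = False
--     for i, char in enumerate(full):
--         if escape:
--             escape = False
--         elif char == "\\":
--             escape = True
--         elif char == ":" and not in_brackets:
--             splits.append(i)
--         elif char == "[":
--             in_brackets = True
--         elif char == "]":
--             in_brackets = False
--
--     parts = []
--     start = 0
--     for i in splits:
--         parts.append(full[start:i])
--         start = i + 1
--     parts.append(full[start:])
--
--     return (parts[-1], parts[:-1], full)
-- ===== Notes on version B (the rewrite author's own statement) =====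
-- stated objective: alternative
-- what changed: Instead of copying characters into a buffer while scanning, B's single scan only records the indices of unescaped depth-0 colons and then builds the parts by slicing the original string between consecutive recorded indices.
import Mathlib
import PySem

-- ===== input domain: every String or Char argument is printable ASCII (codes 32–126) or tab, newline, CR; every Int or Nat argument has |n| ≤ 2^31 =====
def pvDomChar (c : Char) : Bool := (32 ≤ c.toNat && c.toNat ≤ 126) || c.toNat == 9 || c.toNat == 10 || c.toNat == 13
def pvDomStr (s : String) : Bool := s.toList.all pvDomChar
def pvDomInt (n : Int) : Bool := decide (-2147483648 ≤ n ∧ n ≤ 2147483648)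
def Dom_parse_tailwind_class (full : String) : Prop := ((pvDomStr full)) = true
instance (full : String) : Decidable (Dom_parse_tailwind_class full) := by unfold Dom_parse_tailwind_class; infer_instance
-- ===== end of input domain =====

-- B records colon indices in one scan and slices the original string, instead of A's character buffer; objective: alternative decomposition, same cost.

-- ===== PORT A =====
-- the for-loop of A, state (parts, buffer, in_brackets, escape); at the end the buffer is flushed
def pvLoopA : List Char → List String → List Char → Bool → Bool → List String
  | [], parts, buf, _inB, _esc => parts ++ [String.mk buf]
  | c :: cs, parts, buf, inB, esc =>
    if esc then pvLoopA cs parts (buf ++ [c]) inB false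
    else if c = '\\' then pvLoopA cs parts (buf ++ [c]) inB true
    else if c = ':' && !inB then pvLoopA cs (parts ++ [String.mk buf]) [] inB false
    else pvLoopA cs parts (buf ++ [c]) (if c = '[' then true else if c = ']' then false else inB) esc

def parse_tailwind_class (full : String) : String × List String × String :=
  let parts := pvLoopA full.toList [] [] false false
  -- parts is always nonempty (final flush), so parts[-1] never raises; getLastD/dropLast = parts[-1]/parts[:-1]
  (parts.getLastD "", parts.dropLast, full)

-- ===== PORT B =====
-- first scan of B: indices of unescaped depth-0 colons (i is the running enumerate index)
def pvLoopB : List Char → Nat → Bool → Bool → List Nat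
  | [], _i, _inB, _esc => []
  | c :: cs, i, inB, esc =>
    if esc then pvLoopB cs (i + 1) inB false
    else if c = '\\' then pvLoopB cs (i + 1) inB true
    else if c = ':' && !inB then i :: pvLoopB cs (i + 1) inB esc
    else pvLoopB cs (i + 1) (if c = '[' then true else if c = ']' then false else inB) esc

-- second loop of B: full[start:j] for each split j, then full[start:]; the slice indices are
-- in range and increasing, so Python's slice is exactly drop/take here
def pvBuildParts (l : List Char) : List Nat → Nat → List (List Char)
  | [], start => [l.drop start]
  | j :: js, start => (l.drop start).take (j - start) :: pvBuildParts l js (j + 1)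

def parse_tailwind_class_alt (full : String) : String × List String × String :=
  let splits := pvLoopB full.toList 0 false false
  let parts := (pvBuildParts full.toList splits 0).map String.mk
  (parts.getLastD "", parts.dropLast, full)

-- ===== PRECONDITION & SPEC =====
def Spec_parse_tailwind_class (full : String) (out : String × List String × String) : Prop := out = parse_tailwind_class_alt full
instance (full : String) (out : String × List String × String) : Decidable (Spec_parse_tailwind_class full out) := by unfold Spec_parse_tailwind_class; infer_instance

-- ===== CLAIM (what is proved, stated in full; the proofs are below) =====
def Claim_equal_parse_tailwind_class : Prop := ∀ (full : String), Dom_parse_tailwind_class full → Spec_parse_tailwind_class full (parse_tailwind_class full)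

-- ===== LEMMAS AND PROOFS =====

-- prepend a char / a buffer to the first segment
def pvConsC (c : Char) : List (List Char) → List (List Char)
  | [] => [[c]]
  | p :: ps => (c :: p) :: ps

def pvConsB (buf : List Char) : List (List Char) → List (List Char)
  | [] => [buf]
  | p :: ps => (buf ++ p) :: ps

-- reference meaning: the list of colon-separated segments of cs
def pvSegs : List Char → Bool → Bool → List (List Char)
  | [], _inB, _esc => [[]]
  | c :: cs, inB, esc =>
    if esc then pvConsC c (pvSegs cs inB false)
    else if c = '\\' then pvConsC c (pvSegs cs inB true)
    else if c = ':' && !inB then [] :: pvSegs cs inB false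
    else pvConsC c (pvSegs cs (if c = '[' then true else if c = ']' then false else inB) esc)

theorem pvConsB_consC (buf : List Char) (c : Char) (s : List (List Char)) :
    pvConsB buf (pvConsC c s) = pvConsB (buf ++ [c]) s := by
  cases s <;> simp [pvConsB, pvConsC]

theorem pvConsC_ne_nil (c : Char) (s : List (List Char)) : pvConsC c s ≠ [] := by
  cases s <;> simp [pvConsC]

theorem pvSegs_ne_nil (cs : List Char) (inB esc : Bool) : pvSegs cs inB esc ≠ [] := by
  cases cs with
  | nil => simp [pvSegs]
  | cons c cs =>
    simp only [pvSegs]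
    split_ifs <;> first | exact pvConsC_ne_nil _ _ | simp

theorem pvConsB_nil (s : List (List Char)) (h : s ≠ []) : pvConsB [] s = s := by
  cases s with
  | nil => exact absurd rfl h
  | cons p ps => simp [pvConsB]

theorem pvLoopA_eq (cs : List Char) : ∀ (parts : List String) (buf : List Char) (inB esc : Bool),
    pvLoopA cs parts buf inB esc = parts ++ (pvConsB buf (pvSegs cs inB esc)).map String.mk := by
  induction cs with
  | nil => intro parts buf inB esc; simp [pvLoopA, pvSegs, pvConsB]
  | cons c cs ih =>
    intro parts buf inB esc
    simp only [pvLoopA, pvSegs]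
    split_ifs with h1 h2 h3
    · rw [ih, pvConsB_consC]
    · rw [ih, pvConsB_consC]
    · rw [ih, pvConsB_nil _ (pvSegs_ne_nil cs inB false)]
      cases h : pvSegs cs inB false with
      | nil => exact absurd h (pvSegs_ne_nil cs inB false)
      | cons p ps => simp [pvConsB]
    all_goals rw [ih, pvConsB_consC]

theorem pvLoopB_ge (cs : List Char) : ∀ (i : Nat) (inB esc : Bool) (j : Nat),
    j ∈ pvLoopB cs i inB esc → i ≤ j := by
  induction cs with
  | nil => intro i inB esc j h; simp [pvLoopB] at h
  | cons c cs ih =>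
    intro i inB esc j h
    simp only [pvLoopB] at h
    split_ifs at h with h1 h2 h3
    · exact Nat.le_of_succ_le (ih _ _ _ _ h)
    · exact Nat.le_of_succ_le (ih _ _ _ _ h)
    · rcases List.mem_cons.mp h with h | h
      · omega
      · exact Nat.le_of_succ_le (ih _ _ _ _ h)
    all_goals exact Nat.le_of_succ_le (ih _ _ _ _ h)

theorem pvBuildParts_step (l : List Char) (S : List Nat) (i : Nat) (c : Char) (rest : List Char)
    (hd : l.drop i = c :: rest) (hS : ∀ j ∈ S, i + 1 ≤ j) :
    pvBuildParts l S i = pvConsC c (pvBuildParts l S (i + 1)) := by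
  have hd1 : l.drop (i + 1) = rest := by
    rw [← List.drop_drop, hd]; simp
  cases S with
  | nil => simp [pvBuildParts, pvConsC, hd, hd1]
  | cons j js =>
    have hj : i + 1 ≤ j := hS j (List.mem_cons_self ..)
    have : j - i = (j - (i + 1)) + 1 := by omega
    simp [pvBuildParts, pvConsC, hd, hd1, this, List.take_succ_cons]

theorem pvLoopB_segs (l : List Char) (cs : List Char) :
    ∀ (i : Nat) (inB esc : Bool), l.drop i = cs →
    pvBuildParts l (pvLoopB cs i inB esc) i = pvSegs cs inB esc := by
  induction cs with
  | nil => intro i inB esc h; simp [pvLoopB, pvBuildParts, pvSegs, h]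
  | cons c cs ih =>
    intro i inB esc h
    have hd1 : l.drop (i + 1) = cs := by
      rw [← List.drop_drop, h]; simp
    simp only [pvLoopB, pvSegs]
    split_ifs with h1 h2 h3
    · rw [pvBuildParts_step l _ i c cs h (fun j hj => pvLoopB_ge cs (i + 1) inB false j hj),
        ih _ _ _ hd1]
    · rw [pvBuildParts_step l _ i c cs h (fun j hj => pvLoopB_ge cs (i + 1) inB true j hj),
        ih _ _ _ hd1]
    · simp only [pvBuildParts, Nat.sub_self, List.take_zero]
      rw [ih _ _ _ hd1]
      simp only [Bool.not_eq_true] at h1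
      rw [h1]
    all_goals rw [pvBuildParts_step l _ i c cs h (fun j hj => pvLoopB_ge cs (i + 1) _ _ j hj),
        ih _ _ _ hd1]

theorem parts_eq (full : String) :
    pvLoopA full.toList [] [] false false =
      (pvBuildParts full.toList (pvLoopB full.toList 0 false false) 0).map String.mk := by
  rw [pvLoopA_eq, pvConsB_nil _ (pvSegs_ne_nil _ _ _),
    pvLoopB_segs full.toList full.toList 0 false false List.drop_zero]
  simp

-- ===== VERDICT (by name: the statement is the Claim_ definition above) =====
theorem parse_tailwind_class_spec : Claim_equal_parse_tailwind_class := by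
  intro full _
  unfold Spec_parse_tailwind_class parse_tailwind_class parse_tailwind_class_alt
  rw [parts_eq]
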